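-- pv_equiv track=rewrite | github.com/Thoams0211/TermGPT | Multi-CL/experiments/cl-token.py | ent_mix
-- ===== SOURCE A (Python) =====
-- def ent_mix(text1, ent1, ent2):
--     # Replace all ent1 with ent2 in text1
--     replaced_text = text1.replace(ent1, ent2)
--
--     # Split replaced_text by ent2
--     segs = replaced_text.split(ent2)
--
--     # Initialize new_segs and signs
--     new_segs = []
--     signs = []
--
--     # Iterate over the segments
--     for i, seg in enumerate(segs):
--         if seg:  # If the segment is not empty
--             new_segs.append(seg)
--             signs.append(1)  # The part from text1 is marked as 1
--
--         # If it is not the last segment, add ent2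
--         if i != len(segs) - 1:
--             new_segs.append(ent2)
--             signs.append(-1)  # ent2 is marked as -1
--
--     return new_segs, signs
-- ===== SOURCE B (Python) =====
-- def ent_mix(text1, ent1, ent2):
--     if not ent2:
--         raise ValueError("empty separator")
--     text = text1.replace(ent1, ent2)
--     new_segs = []
--     signs = []
--     cur = []
--     i, n, k = 0, len(text), len(ent2)
--     while i < n:
--         if text.startswith(ent2, i):
--             if cur:
--                 new_segs.append(''.join(cur))
--                 signs.append(1)
--                 cur = []
--             new_segs.append(ent2)
--             signs.append(-1)
--             i += k
--         else:
--             cur.append(text[i])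
--             i += 1
--     if cur:
--         new_segs.append(''.join(cur))
--         signs.append(1)
--     return new_segs, signs
-- ===== Notes on version B (the rewrite author's own statement) =====
-- stated objective: alternative
-- what changed: replaces A's replace/split-then-positional-interleave ('i != len-1') with a single left-to-right tokenizer scan over the replaced text that emits entity and non-entity tokens with their signs as it goes
import Mathlib
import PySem

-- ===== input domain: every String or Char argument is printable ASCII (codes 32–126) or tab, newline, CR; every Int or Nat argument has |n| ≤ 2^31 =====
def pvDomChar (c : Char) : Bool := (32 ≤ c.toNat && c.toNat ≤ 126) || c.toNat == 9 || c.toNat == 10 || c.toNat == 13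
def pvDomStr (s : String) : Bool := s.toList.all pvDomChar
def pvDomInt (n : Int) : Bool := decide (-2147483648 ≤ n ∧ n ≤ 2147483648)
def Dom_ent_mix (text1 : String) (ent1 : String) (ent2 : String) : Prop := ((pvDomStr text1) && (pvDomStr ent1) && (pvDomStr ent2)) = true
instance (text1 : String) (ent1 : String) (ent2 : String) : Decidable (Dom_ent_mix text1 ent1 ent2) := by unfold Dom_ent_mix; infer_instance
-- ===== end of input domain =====

-- B replaces A's replace/split plus positional interleave with a one-pass tokenizer scan; objective: alternative (same cost).

-- ===== PORT A =====
-- A: replaced = text1.replace(ent1, ent2); segs = replaced.split(ent2); then the enumerate loop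
-- appending each nonempty segment with sign 1 and ent2 with sign -1 after every non-last segment.
def ent_mix (text1 : String) (ent1 : String) (ent2 : String) : List String × List Int :=
  let replaced := PySem.Chars.replace text1.toList ent1.toList ent2.toList
  match PySem.Chars.split? replaced ent2.toList with
  | none => ([], [])   -- split('') raises ValueError: excluded by Pre_ent_mix
  | some segs =>
    let r := (PySem.List.enumerate segs).foldl
      (fun (acc : List (List Char) × List Int) (p : Int × List Char) =>
        let acc1 := if !p.2.isEmpty then (acc.1 ++ [p.2], acc.2 ++ [(1 : Int)]) else acc
        if p.1 ≠ (segs.length : Int) - 1 then (acc1.1 ++ [ent2.toList], acc1.2 ++ [(-1 : Int)]) else acc1)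
      ([], [])
    (r.1.map String.ofList, r.2)

-- ===== PORT B =====
-- B's while loop over the replaced text: at each position, if ent2 starts here flush the current
-- run (sign 1), emit ent2 (sign -1) and skip it, else move one char into the current run.
-- Fuel (= remaining length + 1) only makes the recursion structural; it never runs out.
def entMixScan (sep : List Char) : Nat → List Char → List Char → List (List Char) × List Int
  | 0, l, cur =>
    if (cur ++ l).isEmpty then ([], []) else ([cur ++ l], [1])
  | _ + 1, [], cur =>
    if cur.isEmpty then ([], []) else ([cur], [1])
  | fuel + 1, c :: rest, cur =>
    if sep.isPrefixOf (c :: rest) then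
      let tail := entMixScan sep fuel (List.drop sep.length (c :: rest)) []
      ((if cur.isEmpty then [] else [cur]) ++ sep :: tail.1,
       (if cur.isEmpty then [] else [(1 : Int)]) ++ (-1 : Int) :: tail.2)
    else
      entMixScan sep fuel rest (cur ++ [c])

def ent_mix_alt (text1 : String) (ent1 : String) (ent2 : String) : List String × List Int :=
  if ent2.toList.isEmpty then ([], [])   -- B raises ValueError here: excluded by Pre_ent_mix
  else
    let text := PySem.Chars.replace text1.toList ent1.toList ent2.toList
    let r := entMixScan ent2.toList (text.length + 1) text []
    (r.1.map String.ofList, r.2)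

-- ===== PRECONDITION & SPEC =====
-- Pre_ excludes only ent2 = "", on which A raises ValueError (str.split with an empty separator).
def Pre_ent_mix (_text1 : String) (_ent1 : String) (ent2 : String) : Prop := ent2 ≠ ""
instance (text1 : String) (ent1 : String) (ent2 : String) : Decidable (Pre_ent_mix text1 ent1 ent2) := by unfold Pre_ent_mix; infer_instance
def pvWitness_ent_mix : String × String × String := ("I saw Paris and paris.", "Paris", "[E]")

def Spec_ent_mix (text1 : String) (ent1 : String) (ent2 : String) (out : List String × List Int) : Prop := out = ent_mix_alt text1 ent1 ent2
instance (text1 : String) (ent1 : String) (ent2 : String) (out : List String × List Int) : Decidable (Spec_ent_mix text1 ent1 ent2 out) := by unfold Spec_ent_mix; infer_instance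

-- ===== CLAIM (what is proved, stated in full; the proofs are below) =====
def Claim_equal_ent_mix : Prop := ∀ (text1 : String) (ent1 : String) (ent2 : String), Dom_ent_mix text1 ent1 ent2 → Pre_ent_mix text1 ent1 ent2 → Spec_ent_mix text1 ent1 ent2 (ent_mix text1 ent1 ent2)

-- ===== LEMMAS AND PROOFS =====

-- The common interleaving shape: what both sides produce from the list of split segments.
def entInter (sep : List Char) : List (List Char) → List (List Char) × List Int
  | [] => ([], [])
  | [s] => (if s.isEmpty then [] else [s], if s.isEmpty then [] else [(1 : Int)])
  | s :: r :: t =>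
    let tail := entInter sep (r :: t)
    ((if s.isEmpty then [] else [s]) ++ sep :: tail.1,
     (if s.isEmpty then [] else [(1 : Int)]) ++ (-1 : Int) :: tail.2)

theorem go_acc (sep : List Char) (fuel : Nat) :
    ∀ (l cur : List Char) (acc : List (List Char)),
      PySem.Chars.splitOn.go sep fuel l cur acc
        = acc.reverse ++ PySem.Chars.splitOn.go sep fuel l cur [] := by
  induction fuel with
  | zero => intro l cur acc; simp [PySem.Chars.splitOn.go]
  | succ fuel ih =>
    intro l cur acc
    cases l with
    | nil => simp [PySem.Chars.splitOn.go]
    | cons c rest =>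
      simp only [PySem.Chars.splitOn.go]
      by_cases h : sep.isPrefixOf (c :: rest) = true
      · simp only [h, if_true]
        rw [ih _ _ (cur.reverse :: acc), ih _ _ [cur.reverse]]
        simp
      · simp only [h, Bool.false_eq_true, if_false]
        rw [ih rest (c :: cur) acc]

theorem go_ne_nil (sep : List Char) (fuel : Nat) :
    ∀ (l cur : List Char), PySem.Chars.splitOn.go sep fuel l cur [] ≠ [] := by
  induction fuel with
  | zero => intro l cur; simp [PySem.Chars.splitOn.go]
  | succ fuel ih =>
    intro l cur
    cases l with
    | nil => simp [PySem.Chars.splitOn.go]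
    | cons c rest =>
      simp only [PySem.Chars.splitOn.go]
      by_cases h : sep.isPrefixOf (c :: rest) = true
      · simp only [h, if_true]
        rw [go_acc sep fuel _ _ [cur.reverse]]
        simp
      · simp only [h, Bool.false_eq_true, if_false]; exact ih rest (c :: cur)

-- B's scan equals entInter of the split produced by splitOn.go (cur is stored reversed in go).
theorem scan_eq_inter (sep : List Char) (fuel : Nat) :
    ∀ (l cur : List Char),
      entMixScan sep fuel l cur
        = entInter sep (PySem.Chars.splitOn.go sep fuel l cur.reverse []) := by
  induction fuel with
  | zero =>
    intro l cur
    simp only [PySem.Chars.splitOn.go, entMixScan, entInter, List.reverse_reverse,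
      List.reverse_cons, List.reverse_nil, List.nil_append]
    split_ifs with h1 <;> simp_all
  | succ fuel ih =>
    intro l cur
    cases l with
    | nil =>
      simp only [PySem.Chars.splitOn.go, entMixScan, entInter, List.reverse_reverse,
        List.reverse_cons, List.reverse_nil, List.nil_append]
      split_ifs with h1 <;> simp_all
    | cons c rest =>
      simp only [PySem.Chars.splitOn.go, entMixScan]
      by_cases h : sep.isPrefixOf (c :: rest) = true
      · simp only [h, if_true]
        rw [go_acc sep fuel _ _ [cur.reverse.reverse]]
        have ihd := ih (List.drop sep.length (c :: rest)) []
        rw [List.reverse_nil] at ihd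
        obtain ⟨x, t, hx⟩ :=
          List.exists_cons_of_ne_nil (go_ne_nil sep fuel (List.drop sep.length (c :: rest)) [])
        rw [hx] at ihd
        rw [hx]
        simp only [List.reverse_reverse, List.reverse_cons, List.reverse_nil, List.nil_append,
          List.singleton_append, entInter, ihd]
      · simp only [h, Bool.false_eq_true, if_false]
        rw [ih rest (cur ++ [c])]
        simp

-- A's enumerate loop equals entInter (n is the full length; s tracks the start index).
theorem foldA_eq_inter (sep : List Char) (n : Int) :
    ∀ (segs : List (List Char)) (s : Int) (acc : List (List Char) × List Int),
      segs ≠ [] → s + segs.length = n →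
      (PySem.List.enumerate segs s).foldl
        (fun (acc : List (List Char) × List Int) (p : Int × List Char) =>
          let acc1 := if !p.2.isEmpty then (acc.1 ++ [p.2], acc.2 ++ [(1 : Int)]) else acc
          if p.1 ≠ n - 1 then (acc1.1 ++ [sep], acc1.2 ++ [(-1 : Int)]) else acc1) acc
      = (acc.1 ++ (entInter sep segs).1, acc.2 ++ (entInter sep segs).2) := by
  intro segs
  induction segs with
  | nil => intro s acc h; exact absurd rfl h
  | cons x rest ih =>
    intro s acc _ hn
    rw [PySem.List.enumerate.eq_2]
    simp only [List.foldl_cons]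
    cases rest with
    | nil =>
      have hs : s = n - 1 := by simp at hn; omega
      simp only [PySem.List.enumerate_nil, List.foldl_nil]
      by_cases hx : x.isEmpty <;>
        simp [hx, hs, entInter]
    | cons y t =>
      have hrest : (y :: t : List (List Char)) ≠ [] := by simp
      have hn' : (s + 1) + ((y :: t : List (List Char)).length : Int) = n := by
        simp at hn ⊢; omega
      have hs : ¬ (s = n - 1) := by simp at hn; omega
      rw [ih (s + 1) _ hrest hn']
      by_cases hx : x.isEmpty <;>
        simp [hx, hs, entInter]

-- ===== VERDICT (by name: the statement is the Claim_ definition above) =====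
theorem ent_mix_spec : Claim_equal_ent_mix := by
  intro text1 ent1 ent2 _ hpre
  unfold Spec_ent_mix ent_mix ent_mix_alt
  have hsep : ent2.toList ≠ [] := by
    intro h
    exact hpre (String.toList_eq_nil_iff.mp h)
  have hE : ent2.toList.isEmpty = false := by simp [hsep]
  simp only [PySem.Chars.split?, hE, Bool.false_eq_true, if_false]
  set tx := PySem.Chars.replace text1.toList ent1.toList ent2.toList with htx
  have hgo : PySem.Chars.splitOn tx ent2.toList
      = PySem.Chars.splitOn.go ent2.toList (tx.length + 1) tx [] [] := rfl
  have hne : PySem.Chars.splitOn tx ent2.toList ≠ [] := by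
    rw [hgo]; exact go_ne_nil _ _ _ _
  rw [foldA_eq_inter ent2.toList ((PySem.Chars.splitOn tx ent2.toList).length : Int)
        (PySem.Chars.splitOn tx ent2.toList) 0 ([], []) hne (by simp)]
  rw [scan_eq_inter, List.reverse_nil, ← hgo]
  simp
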